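-- pv_equiv track=rewrite | github.com/hsamvel/Phyton_langauge_homeworks | homework13_1(Narek).py | str_vs_str
-- ===== SOURCE A (Python) =====
-- def str_vs_str(str1,str2):
--     count = 0
--     for el in str1:
--         if el in str2:
--             if list(str1).count(el) == list(str2).count(el):
--                 count += 1
--     if count == len(str2):
--         return True
--     return False
-- ===== SOURCE B (Python) =====
-- def str_vs_str(str1, str2):
--     freq1 = {}
--     for c in str1:
--         freq1[c] = freq1.get(c, 0) + 1
--     freq2 = {}
--     for c in str2:
--         freq2[c] = freq2.get(c, 0) + 1
--     return all(freq1.get(c, 0) == n for c, n in freq2.items())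
-- ===== Notes on version B (the rewrite author's own statement) =====
-- stated objective: faster
-- what changed: B builds one frequency dict per string in a single pass and checks every distinct char of str2 has equal counts, replacing A's per-position rescans (list(...).count inside the loop) and the accumulate-then-compare-to-len(str2) test.
import Mathlib
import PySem

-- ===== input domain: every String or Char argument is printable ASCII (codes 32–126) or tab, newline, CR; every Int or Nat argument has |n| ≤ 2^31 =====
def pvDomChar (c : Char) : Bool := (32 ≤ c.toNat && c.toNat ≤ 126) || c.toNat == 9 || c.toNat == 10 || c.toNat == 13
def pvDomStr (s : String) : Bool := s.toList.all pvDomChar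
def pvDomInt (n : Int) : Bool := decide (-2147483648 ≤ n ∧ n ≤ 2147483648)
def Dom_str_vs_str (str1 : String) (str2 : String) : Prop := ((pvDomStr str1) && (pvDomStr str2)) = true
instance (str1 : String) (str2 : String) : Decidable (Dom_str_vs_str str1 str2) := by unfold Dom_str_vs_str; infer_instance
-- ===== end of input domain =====

-- B replaces A's per-position rescans with one frequency dict per string built in a
-- single pass, then checks every distinct char of str2 has equal counts (faster).

-- ===== PORT A =====
def str_vs_str (str1 : String) (str2 : String) : Bool :=
  let count : Int := str1.toList.foldl (fun count el =>
    if PySem.Chars.isIn [el] str2.toList then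
      if str1.toList.count el == str2.toList.count el then count + 1 else count
    else count) 0
  if count == PySem.Str.len str2 then true else false

-- ===== PORT B =====
def str_vs_str_alt (str1 : String) (str2 : String) : Bool :=
  let freq1 : PySem.Dict Char Int :=
    str1.toList.foldl (fun d c => d.insert c (d.getD c 0 + 1)) PySem.Dict.empty
  let freq2 : PySem.Dict Char Int :=
    str2.toList.foldl (fun d c => d.insert c (d.getD c 0 + 1)) PySem.Dict.empty
  freq2.items.all (fun p => freq1.getD p.1 0 == p.2)

-- ===== PRECONDITION & SPEC =====
def Spec_str_vs_str (str1 : String) (str2 : String) (out : Bool) : Prop := out = str_vs_str_alt str1 str2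
instance (str1 : String) (str2 : String) (out : Bool) : Decidable (Spec_str_vs_str str1 str2 out) := by unfold Spec_str_vs_str; infer_instance

-- ===== CLAIM (what is proved, stated in full; the proofs are below) =====
def Claim_equal_str_vs_str : Prop := ∀ (str1 : String) (str2 : String), Dom_str_vs_str str1 str2 → Spec_str_vs_str str1 str2 (str_vs_str str1 str2)

-- ===== LEMMAS AND PROOFS =====

-- the per-element test A effectively applies
def pvTest (l1 l2 : List Char) (el : Char) : Bool :=
  PySem.Chars.isIn [el] l2 && (l1.count el == l2.count el)

theorem pvTest_iff (l1 l2 : List Char) (el : Char) :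
    pvTest l1 l2 el = true ↔ el ∈ l2 ∧ l1.count el = l2.count el := by
  simp [pvTest, PySem.Chars.isIn_iff_infix, List.singleton_infix_iff]

-- the central arithmetic fact: A's accumulated count hits len(str2) exactly when
-- every character of str2 has the same frequency in str1 and str2
theorem countP_eq_length_iff (l1 l2 : List Char) :
    l1.countP (pvTest l1 l2) = l2.length ↔ ∀ c ∈ l2, l1.count c = l2.count c := by
  have hle : (↑(l1.filter (pvTest l1 l2)) : Multiset Char) ≤ (↑l2 : Multiset Char) := by
    rw [Multiset.le_iff_count]
    intro c
    simp only [Multiset.coe_count]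
    by_cases hp : pvTest l1 l2 c = true
    · rw [List.count_filter hp]
      exact le_of_eq ((pvTest_iff l1 l2 c).mp hp).2
    · have : (l1.filter (pvTest l1 l2)).count c = 0 := by
        rw [List.count_eq_zero]
        intro hmem
        exact hp (List.of_mem_filter hmem)
      omega
  rw [List.countP_eq_length_filter]
  constructor
  · intro hlen c hc
    have heq : (↑(l1.filter (pvTest l1 l2)) : Multiset Char) = (↑l2 : Multiset Char) :=
      Multiset.eq_of_le_of_card_le hle (by simp [hlen])
    have hcnt : (l1.filter (pvTest l1 l2)).count c = l2.count c := by
      have := congrArg (Multiset.count c) heq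
      simpa using this
    have hpos : 0 < l2.count c := List.count_pos_iff.mpr hc
    by_cases hp : pvTest l1 l2 c = true
    · exact ((pvTest_iff l1 l2 c).mp hp).2
    · exfalso
      have : (l1.filter (pvTest l1 l2)).count c = 0 := by
        rw [List.count_eq_zero]
        intro hmem
        exact hp (List.of_mem_filter hmem)
      omega
  · intro hall
    have hcnt : ∀ c, (l1.filter (pvTest l1 l2)).count c = l2.count c := by
      intro c
      by_cases hc : c ∈ l2
      · have hp : pvTest l1 l2 c = true := (pvTest_iff l1 l2 c).mpr ⟨hc, hall c hc⟩
        rw [List.count_filter hp]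
        exact hall c hc
      · have h2 : l2.count c = 0 := List.count_eq_zero.mpr hc
        have h1 : (l1.filter (pvTest l1 l2)).count c = 0 := by
          rw [List.count_eq_zero]
          intro hmem
          exact hc ((pvTest_iff l1 l2 c).mp (List.of_mem_filter hmem)).1
        omega
    have : (↑(l1.filter (pvTest l1 l2)) : Multiset Char) = (↑l2 : Multiset Char) := by
      ext c
      simpa using hcnt c
    have := congrArg Multiset.card this
    simpa using this

-- A's nested-if loop body is the single-test counting loop
theorem strA_eq (str1 str2 : String) :
    str_vs_str str1 str2
      = decide (str1.toList.countP (pvTest str1.toList str2.toList) = str2.toList.length) := by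
  unfold str_vs_str
  have hfun : (fun (count : Int) (el : Char) =>
      if PySem.Chars.isIn [el] str2.toList then
        if str1.toList.count el == str2.toList.count el then count + 1 else count
      else count)
      = (fun (count : Int) (el : Char) =>
          if pvTest str1.toList str2.toList el then count + 1 else count) := by
    funext count el
    simp only [pvTest, Bool.and_eq_true]
    by_cases h1 : PySem.Chars.isIn [el] str2.toList = true <;>
      by_cases h2 : (str1.toList.count el == str2.toList.count el) = true <;>
      simp [h1, h2]
  rw [hfun, PySem.List.foldl_if_add_one, PySem.Str.len_eq]
  simp only [zero_add, beq_iff_eq]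
  by_cases h : str1.toList.countP (pvTest str1.toList str2.toList) = str2.toList.length <;>
    simp [h]

-- B is the universal equal-frequency check over the distinct chars of str2
theorem strB_eq (str1 str2 : String) :
    str_vs_str_alt str1 str2
      = decide (∀ c ∈ str2.toList, str1.toList.count c = str2.toList.count c) := by
  unfold str_vs_str_alt
  rw [Bool.eq_iff_iff]
  simp only [PySem.Dict.foldl_insert_getD_add_one_eq_counter, PySem.Dict.items_counter,
    List.all_map, List.all_eq_true, Function.comp, PySem.Dict.getD_counter,
    beq_iff_eq, Nat.cast_inj, PySem.Set.mem_ofList, decide_eq_true_eq]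

-- ===== VERDICT (by name: the statement is the Claim_ definition above) =====
theorem str_vs_str_spec : Claim_equal_str_vs_str := by
  intro str1 str2 _
  unfold Spec_str_vs_str
  rw [strA_eq, strB_eq]
  simp only [decide_eq_decide]
  exact countP_eq_length_iff _ _
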